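-- pv_equiv track=rewrite | github.com/al-bose/H8rs-Gonna-H8 | sentiment_analysis.py | get_state_name
-- ===== SOURCE A (Python) =====
-- def get_state_name(location):
--
-- 	states = ["AL", "AK", "AZ", "AR", "CA", "CO", "CT", "DC", "DE", "FL", "GA",
-- 			  "HI", "ID", "IL", "IN", "IA", "KS", "KY", "LA", "ME", "MD",
-- 			  "MA", "MI", "MN", "MS", "MO", "MT", "NE", "NV", "NH", "NJ",
-- 			  "NM", "NY", "NC", "ND", "OH", "OK", "OR", "PA", "RI", "SC",
-- 			  "SD", "TN", "TX", "UT", "VT", "VA", "WA", "WV", "WI", "WY"]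
--
-- 	states_dict = {
-- 			'AK': 'ALASKA','AL': 'ALABAMA','AR': 'ARKANSAS',
-- 			'AZ': 'ARIZONA','CA': 'CALIFORNIA','CO': 'COLORADO','CT': 'CONNECTICUT',
-- 			'DC': 'DISTRICT OF COLUMBIA','DE': 'DELAWARE','FL': 'FLORIDA','GA': 'GEORGIA'
-- 			,'HI': 'HAWAII','IA': 'IOWA','ID': 'IDAHO','IL': 'ILLINOIS',
-- 			'IN': 'INDIANA','KS': 'KANSAS','KY': 'KENTUCKY','LA': 'LOUISIANA',
-- 			'MA': 'MASSACHUSETTS','MD': 'MARYLAND','ME': 'MAINE','MI': 'MICHIGAN',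
-- 			'MN': 'MINNESOTA','MO': 'MISSOURI',
-- 			'MS': 'MISSISSIPPI','MT': 'MONTANA','NC': 'NORTH CAROLINA',
-- 			'ND': 'NORTH DAKOTA','NE': 'NEBRASKA','NH': 'NEW HAMPSHIRE','NJ': 'NEW JERSEY',
-- 			'NM': 'NEW MEXICO','NV': 'NEVADA','NY': 'NEW YORK','OH': 'OHIO','OK': 'OKLAHOMA',
-- 			'OR': 'OREGON','PA': 'PENNSYLVANIA','RI': 'RHODE ISLAND',
-- 			'SC': 'SOUTH CAROLINA','SD': 'SOUTH DAKOTA','TN': 'TENNESSEE','TX': 'TEXAS',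
-- 			'UT': 'UTAH','VA': 'VIRGINIA','VT': 'VERMONT',
-- 			'WA': 'WASHINGTON','WI': 'WISCONSIN','WV': 'WEST VIRGINIA','WY': 'WYOMING'
-- 	}
--
--
-- 	location = str(location)
-- 	location = location.replace(',', ' ')
-- 	location = location.split()
--
-- 	location = [loc.upper() for loc in location]
--
-- 	for i in range(len(location)):
-- 		try:
-- 			if location[i] in states:
-- 				return location[i]
-- 			elif location[i] in states_dict.values():
-- 				return list(states_dict.keys())[list(states_dict.values()).index(location[i])]
-- 			elif (location[i] == "NEW") and (location[i+1] == "HAMPSHIRE"):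
-- 				return "NH"
-- 			elif (location[i] == "NEW") and (location[i+1] == "JERSEY"):
-- 				return "NJ"
-- 			elif (location[i] == "NEW") and (location[i+1] == "MEXICO"):
-- 				return "NM"
-- 			elif (location[i] == "NORTH") and (location[i+1] == "CAROLINA"):
-- 				return "NC"
-- 			elif (location[i] == "NORTH") and (location[i+1] == "DAKOTA"):
-- 				return "ND"
-- 			elif (location[i] == "SOUTH") and (location[i+1] == "CAROLINA"):
-- 				return "SC"
-- 			elif (location[i] == "SOUTH") and (location[i+1] == "DAKOTA"):
-- 				return "SD"
-- 			elif (location[i] == "DISTRICT") and (location[i+1] == "OF") and (location[i+2] == "COLUMBIA"):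
-- 				return "DC"
-- 			elif (location[i] == "NEW") and (location[i+1] == "YORK"):
-- 				return "NY"
-- 			elif (location[i] == "RHODE") and (location[i+1] == "ISLAND"):
-- 				return "RI"
-- 			elif (location[i] == "WEST") and (location[i+1] == "VIRGINIA"):
-- 				return "WV"
-- 		except Exception:
-- 			return "NULL"
--
-- 	return "NULL"
-- ===== SOURCE B (Python) =====
-- # Pattern-indexed search instead of A's position-indexed cascade: for each state,
-- # find the first token index where its abbreviation or its full name (as a word
-- # sequence) occurs, then return the state with the smallest such index (argmin).
-- # Correct because no state pattern is a word-boundary prefix of another, so at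
-- # most one pattern can start at any token position, and A's try/except "NULL"s
-- # only occur where no match exists at or after that position anyway.
--
-- _NAMES = {
--         'AK': 'ALASKA', 'AL': 'ALABAMA', 'AR': 'ARKANSAS',
--         'AZ': 'ARIZONA', 'CA': 'CALIFORNIA', 'CO': 'COLORADO', 'CT': 'CONNECTICUT',
--         'DC': 'DISTRICT OF COLUMBIA', 'DE': 'DELAWARE', 'FL': 'FLORIDA', 'GA': 'GEORGIA',
--         'HI': 'HAWAII', 'IA': 'IOWA', 'ID': 'IDAHO', 'IL': 'ILLINOIS',
--         'IN': 'INDIANA', 'KS': 'KANSAS', 'KY': 'KENTUCKY', 'LA': 'LOUISIANA',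
--         'MA': 'MASSACHUSETTS', 'MD': 'MARYLAND', 'ME': 'MAINE', 'MI': 'MICHIGAN',
--         'MN': 'MINNESOTA', 'MO': 'MISSOURI',
--         'MS': 'MISSISSIPPI', 'MT': 'MONTANA', 'NC': 'NORTH CAROLINA',
--         'ND': 'NORTH DAKOTA', 'NE': 'NEBRASKA', 'NH': 'NEW HAMPSHIRE', 'NJ': 'NEW JERSEY',
--         'NM': 'NEW MEXICO', 'NV': 'NEVADA', 'NY': 'NEW YORK', 'OH': 'OHIO', 'OK': 'OKLAHOMA',
--         'OR': 'OREGON', 'PA': 'PENNSYLVANIA', 'RI': 'RHODE ISLAND',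
--         'SC': 'SOUTH CAROLINA', 'SD': 'SOUTH DAKOTA', 'TN': 'TENNESSEE', 'TX': 'TEXAS',
--         'UT': 'UTAH', 'VA': 'VIRGINIA', 'VT': 'VERMONT',
--         'WA': 'WASHINGTON', 'WI': 'WISCONSIN', 'WV': 'WEST VIRGINIA', 'WY': 'WYOMING'
-- }
--
--
-- def _first_index(words, pat):
--     for i in range(len(words) - len(pat) + 1):
--         if words[i:i + len(pat)] == pat:
--             return i
--     return None
--
--
-- def get_state_name(location):
--     words = [w.upper() for w in str(location).replace(',', ' ').split()]
--     best_i, best_ab = len(words), "NULL"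
--     for ab, name in _NAMES.items():
--         for pat in ([ab], name.split()):
--             i = _first_index(words, pat)
--             if i is not None and i < best_i:
--                 best_i, best_ab = i, ab
--     return best_ab
-- ===== Notes on version B (the rewrite author's own statement) =====
-- stated objective: alternative
-- what changed: Inverts the loop structure: instead of A's position-indexed scan with a 13-branch elif cascade, values().index reverse lookup and try/except, B searches per state pattern (abbreviation or full-name word sequence) for its first occurrence index in the token list and returns the state with the smallest index (argmin); correct because no state pattern is a word-boundary prefix of another and A's IndexError->NULL only fires where no match follows.
import Mathlib
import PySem

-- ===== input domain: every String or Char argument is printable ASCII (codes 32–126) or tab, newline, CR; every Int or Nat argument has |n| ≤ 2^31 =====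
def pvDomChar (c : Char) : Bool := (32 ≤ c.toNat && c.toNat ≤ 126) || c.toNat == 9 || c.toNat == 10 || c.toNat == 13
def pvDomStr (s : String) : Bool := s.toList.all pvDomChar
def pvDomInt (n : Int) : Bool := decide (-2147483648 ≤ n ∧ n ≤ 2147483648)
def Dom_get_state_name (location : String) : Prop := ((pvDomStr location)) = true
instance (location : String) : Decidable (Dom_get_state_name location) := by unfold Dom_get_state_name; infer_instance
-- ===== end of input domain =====

-- B inverts the loop structure: per-state pattern search with argmin over first
-- occurrence indices, instead of A's position-indexed elif cascade (objective: alternative).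

-- ===== PORT A =====
def pvStates : List String := ["AL", "AK", "AZ", "AR", "CA", "CO", "CT", "DC", "DE", "FL", "GA",
  "HI", "ID", "IL", "IN", "IA", "KS", "KY", "LA", "ME", "MD",
  "MA", "MI", "MN", "MS", "MO", "MT", "NE", "NV", "NH", "NJ",
  "NM", "NY", "NC", "ND", "OH", "OK", "OR", "PA", "RI", "SC",
  "SD", "TN", "TX", "UT", "VT", "VA", "WA", "WV", "WI", "WY"]

-- A's states_dict literal, in its source order (a Python dict literal with distinct keys)
def pvStatesDict : PySem.Dict String String := PySem.Dict.mk
  [("AK","ALASKA"),("AL","ALABAMA"),("AR","ARKANSAS"),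
   ("AZ","ARIZONA"),("CA","CALIFORNIA"),("CO","COLORADO"),("CT","CONNECTICUT"),
   ("DC","DISTRICT OF COLUMBIA"),("DE","DELAWARE"),("FL","FLORIDA"),("GA","GEORGIA"),
   ("HI","HAWAII"),("IA","IOWA"),("ID","IDAHO"),("IL","ILLINOIS"),
   ("IN","INDIANA"),("KS","KANSAS"),("KY","KENTUCKY"),("LA","LOUISIANA"),
   ("MA","MASSACHUSETTS"),("MD","MARYLAND"),("ME","MAINE"),("MI","MICHIGAN"),
   ("MN","MINNESOTA"),("MO","MISSOURI"),
   ("MS","MISSISSIPPI"),("MT","MONTANA"),("NC","NORTH CAROLINA"),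
   ("ND","NORTH DAKOTA"),("NE","NEBRASKA"),("NH","NEW HAMPSHIRE"),("NJ","NEW JERSEY"),
   ("NM","NEW MEXICO"),("NV","NEVADA"),("NY","NEW YORK"),("OH","OHIO"),("OK","OKLAHOMA"),
   ("OR","OREGON"),("PA","PENNSYLVANIA"),("RI","RHODE ISLAND"),
   ("SC","SOUTH CAROLINA"),("SD","SOUTH DAKOTA"),("TN","TENNESSEE"),("TX","TEXAS"),
   ("UT","UTAH"),("VA","VIRGINIA"),("VT","VERMONT"),
   ("WA","WASHINGTON"),("WI","WISCONSIN"),("WV","WEST VIRGINIA"),("WY","WYOMING")]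

-- A's first two branches: `if location[i] in states: return location[i]`,
-- `elif location[i] in states_dict.values(): return list(keys)[values.index(location[i])]`;
-- `some r` = "return r", `none` = fall through to the elif cascade.
def pvSingleA (t : String) : Option String :=
  if pvStates.contains t then some t
  else if pvStatesDict.values.contains t then
    some (match PySem.List.index? pvStatesDict.values t with
          | some j => (PySem.List.pyGet? pvStatesDict.keys ((j : Nat) : Int)).getD "NULL"  -- j is in range (membership just checked); the getD default is never used
          | none => "NULL")  -- unreachable: membership was checked
  else none

-- one elif arm `(location[i] == w and location[i+1] == w'): return r`; `nxt` is the
-- lazily demanded location[i+1] (none = IndexError, caught by the except: "NULL");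
-- `rest` is the remainder of the cascade.
def pvArm (t w : String) (nxt : Option String) (w' r rest : String) : String :=
  if t == w then
    match nxt with
    | none => "NULL"
    | some u => if u == w' then r else rest
  else rest

-- the three-word DISTRICT OF COLUMBIA arm, same conventions
def pvArmDC (t : String) (nxt nxt2 : Option String) (rest : String) : String :=
  if t == "DISTRICT" then
    match nxt with
    | none => "NULL"
    | some u =>
      if u == "OF" then
        match nxt2 with
        | none => "NULL"
        | some v => if v == "COLUMBIA" then "DC" else rest
      else rest
  else rest

-- `for i in range(len(location)): try: … except: return "NULL"` / final `return "NULL"`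
def pvALoop (toks : List String) (i : Nat) : String :=
  if h : i < toks.length then
    match pvSingleA (toks[i]) with
    | some r => r
    | none =>
      pvArm toks[i] "NEW" (PySem.List.pyGet? toks ((i+1 : Nat) : Int)) "HAMPSHIRE" "NH" <|
      pvArm toks[i] "NEW" (PySem.List.pyGet? toks ((i+1 : Nat) : Int)) "JERSEY" "NJ" <|
      pvArm toks[i] "NEW" (PySem.List.pyGet? toks ((i+1 : Nat) : Int)) "MEXICO" "NM" <|
      pvArm toks[i] "NORTH" (PySem.List.pyGet? toks ((i+1 : Nat) : Int)) "CAROLINA" "NC" <|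
      pvArm toks[i] "NORTH" (PySem.List.pyGet? toks ((i+1 : Nat) : Int)) "DAKOTA" "ND" <|
      pvArm toks[i] "SOUTH" (PySem.List.pyGet? toks ((i+1 : Nat) : Int)) "CAROLINA" "SC" <|
      pvArm toks[i] "SOUTH" (PySem.List.pyGet? toks ((i+1 : Nat) : Int)) "DAKOTA" "SD" <|
      pvArmDC toks[i] (PySem.List.pyGet? toks ((i+1 : Nat) : Int)) (PySem.List.pyGet? toks ((i+2 : Nat) : Int)) <|
      pvArm toks[i] "NEW" (PySem.List.pyGet? toks ((i+1 : Nat) : Int)) "YORK" "NY" <|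
      pvArm toks[i] "RHODE" (PySem.List.pyGet? toks ((i+1 : Nat) : Int)) "ISLAND" "RI" <|
      pvArm toks[i] "WEST" (PySem.List.pyGet? toks ((i+1 : Nat) : Int)) "VIRGINIA" "WV" <|
      pvALoop toks (i+1)
  else "NULL"
termination_by toks.length - i

def get_state_name (location : String) : String :=
  pvALoop (((PySem.Str.split₀ (PySem.Str.replace location "," " "))).map PySem.Str.upper) 0

-- ===== PORT B =====
-- Source B's _NAMES dict literal
def pvBNames : PySem.Dict String String := PySem.Dict.mk
  [("AK","ALASKA"),("AL","ALABAMA"),("AR","ARKANSAS"),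
   ("AZ","ARIZONA"),("CA","CALIFORNIA"),("CO","COLORADO"),("CT","CONNECTICUT"),
   ("DC","DISTRICT OF COLUMBIA"),("DE","DELAWARE"),("FL","FLORIDA"),("GA","GEORGIA"),
   ("HI","HAWAII"),("IA","IOWA"),("ID","IDAHO"),("IL","ILLINOIS"),
   ("IN","INDIANA"),("KS","KANSAS"),("KY","KENTUCKY"),("LA","LOUISIANA"),
   ("MA","MASSACHUSETTS"),("MD","MARYLAND"),("ME","MAINE"),("MI","MICHIGAN"),
   ("MN","MINNESOTA"),("MO","MISSOURI"),
   ("MS","MISSISSIPPI"),("MT","MONTANA"),("NC","NORTH CAROLINA"),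
   ("ND","NORTH DAKOTA"),("NE","NEBRASKA"),("NH","NEW HAMPSHIRE"),("NJ","NEW JERSEY"),
   ("NM","NEW MEXICO"),("NV","NEVADA"),("NY","NEW YORK"),("OH","OHIO"),("OK","OKLAHOMA"),
   ("OR","OREGON"),("PA","PENNSYLVANIA"),("RI","RHODE ISLAND"),
   ("SC","SOUTH CAROLINA"),("SD","SOUTH DAKOTA"),("TN","TENNESSEE"),("TX","TEXAS"),
   ("UT","UTAH"),("VA","VIRGINIA"),("VT","VERMONT"),
   ("WA","WASHINGTON"),("WI","WISCONSIN"),("WV","WEST VIRGINIA"),("WY","WYOMING")]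

-- Source B's _first_index(words, pat): `for i in range(len(words) - len(pat) + 1): if words[i:i+len(pat)] == pat: return i`
def pvFindLoop (ws pat : List String) (i : Nat) : Option Nat :=
  if _h : i + pat.length ≤ ws.length then
    if PySem.List.slice ws (some (i : Int)) (some ((i : Int) + (pat.length : Int))) == pat
    then some i else pvFindLoop ws pat (i + 1)
  else none
termination_by ws.length + 1 - i
decreasing_by omega

-- the two nested for-loops with the (best_i, best_ab) accumulator, then `return best_ab`
def get_state_name_alt (location : String) : String :=
  let words := ((PySem.Str.split₀ (PySem.Str.replace location "," " "))).map PySem.Str.upper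
  (pvBNames.items.foldl (fun best p =>
      ([[p.1], PySem.Str.split₀ p.2]).foldl (fun best pat =>
        match pvFindLoop words pat 0 with
        | some i => if i < best.1 then (i, p.1) else best
        | none => best) best)
    (words.length, "NULL")).2

-- ===== PRECONDITION & SPEC =====
def Spec_get_state_name (location : String) (out : String) : Prop := out = get_state_name_alt location
instance (location : String) (out : String) : Decidable (Spec_get_state_name location out) := by unfold Spec_get_state_name; infer_instance

-- ===== CLAIM (what is proved, stated in full; the proofs are below) =====
def Claim_equal_get_state_name : Prop := ∀ (location : String), Dom_get_state_name location → Spec_get_state_name location (get_state_name location)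

-- ===== LEMMAS AND PROOFS =====

-- ---- proof-side vocabulary ----

-- the single-token lookup table A's first two branches implement
def pvSingleList : List (String × String) :=
  (pvStates.map (fun ab => (ab, ab))) ++ (pvBNames.items.map (fun p => (p.2, p.1)))

def pvSingle : PySem.Dict String String := PySem.Dict.ofList pvSingleList

def pvPhrase2 : PySem.Dict (String × String) String := PySem.Dict.mk
  [(("NEW","HAMPSHIRE"),"NH"), (("NEW","JERSEY"),"NJ"), (("NEW","MEXICO"),"NM"),
   (("NORTH","CAROLINA"),"NC"), (("NORTH","DAKOTA"),"ND"),
   (("SOUTH","CAROLINA"),"SC"), (("SOUTH","DAKOTA"),"SD"),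
   (("NEW","YORK"),"NY"), (("RHODE","ISLAND"),"RI"), (("WEST","VIRGINIA"),"WV")]

def pvPhrase3 : PySem.Dict (String × String × String) String := PySem.Dict.mk
  [(("DISTRICT","OF","COLUMBIA"),"DC")]

-- the result A's cascade produces at the head of a token suffix (none = no return here)
def pvHit : List String → Option String
  | [] => none
  | t :: rest =>
    match pvSingle.get? t with
    | some r => some r
    | none =>
      match rest with
      | [] => none
      | u :: rest2 =>
        match pvPhrase2.get? (t, u) with
        | some r => r
        | none =>
          match rest2 with
          | [] => none
          | v :: _ => pvPhrase3.get? (t, u, v)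

-- canonical left-to-right scan over token suffixes
def pvScan : List String → String
  | [] => "NULL"
  | t :: rest => (pvHit (t :: rest)).getD (pvScan rest)

-- B's 102 (pattern words, abbreviation) pairs, in B's iteration order
def pvPats : List (List String × String) :=
  pvBNames.items.flatMap (fun p => [([p.1], p.1), (PySem.Str.split₀ p.2, p.1)])

-- B's inner-loop body on a flattened (pattern, abbrev) stream
def pvBestStep (ws : List String) (best : Nat × String) (pa : List String × String) : Nat × String :=
  match pvFindLoop ws pa.1 0 with
  | some i => if i < best.1 then (i, pa.2) else best
  | none => best

set_option maxRecDepth 40000 in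
theorem pvSingle_mk : pvSingle = PySem.Dict.mk pvSingleList := by
  decide

-- lookup in a diagonal association list is membership
theorem pvGetDiag (xs : List String) (t : String) :
    (PySem.Dict.mk (xs.map (fun ab => (ab, ab)))).get? t = if xs.contains t then some t else none := by
  induction xs with
  | nil => rfl
  | cons a xs ih =>
    rw [List.map_cons, PySem.Dict.get?_mk_cons, ih]
    by_cases h : a = t
    · simp [h]
    · simp [h, Ne.symm h]

-- lookup in a swapped association list is the value→key reverse lookup by first index
theorem pvGetSwap (ps : List (String × String)) (t : String) :
    (PySem.Dict.mk (ps.map (fun p => (p.2, p.1)))).get? t =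
      match PySem.List.index? (ps.map Prod.snd) t with
      | some j => (ps.map Prod.fst)[j]?
      | none => none := by
  induction ps with
  | nil => rfl
  | cons p ps ih =>
    rw [List.map_cons, PySem.Dict.get?_mk_cons, ih, List.map_cons, List.map_cons]
    by_cases h : p.2 = t
    · rw [h, PySem.List.index?_cons_self]
      simp
    · rw [PySem.List.index?_cons_of_ne _ h]
      simp only [beq_iff_eq, h, if_false]
      cases hix : PySem.List.index? (ps.map Prod.snd) t <;> simp

theorem pvGetAppend (l₁ l₂ : List (String × String)) (t : String) :
    (PySem.Dict.mk (l₁ ++ l₂)).get? t = ((PySem.Dict.mk l₁).get? t).or ((PySem.Dict.mk l₂).get? t) := by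
  induction l₁ with
  | nil => rfl
  | cons p l₁ ih =>
    rw [List.cons_append, PySem.Dict.get?_mk_cons, PySem.Dict.get?_mk_cons, ih]
    by_cases h : p.1 = t <;> simp [h]

-- A's two single-token branches compute exactly the pvSingle table lookup
theorem pvSingleA_eq (t : String) : pvSingleA t = pvSingle.get? t := by
  rw [pvSingle_mk]
  unfold pvSingleList
  rw [pvGetAppend, pvGetDiag, pvGetSwap]
  unfold pvSingleA
  have hvals : pvBNames.items.map Prod.snd = pvStatesDict.values := rfl
  have hkeys : pvBNames.items.map Prod.fst = pvStatesDict.keys := rfl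
  rw [hvals, hkeys]
  by_cases hm : t ∈ pvStates
  · simp [hm]
  · have hc : pvStates.contains t = false := by simpa using hm
    simp only [hm, if_false, Option.none_or, hc]
    cases hix : PySem.List.index? pvStatesDict.values t with
    | none =>
      have hnm : ¬ t ∈ pvStatesDict.values := (PySem.List.index?_eq_none_iff _ _).mp hix
      simp [hnm]
    | some j =>
      obtain ⟨hk, he, -⟩ := PySem.List.getElem_of_index?_eq_some hix
      have hmem : t ∈ pvStatesDict.values := he ▸ List.getElem_mem hk
      have hklen : j < pvStatesDict.keys.length := hk
      simp [hmem, PySem.List.pyGet?_natCast, List.getElem?_eq_getElem hklen]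

-- lookup in the empty dict literal finds nothing
theorem pvGetNil {κ ν : Type} [BEq κ] (x : κ) : (PySem.Dict.mk ([] : List (κ × ν))).get? x = none := rfl

-- BEq on pairs/triples of strings unfolds componentwise (definitional)
theorem pvProdBeq2 (a b c d : String) : ((a, b) == (c, d)) = (a == c && b == d) := rfl
theorem pvProdBeq3 (a b c d e f : String) : ((a, b, c) == (d, e, f)) = (a == d && (b == e && c == f)) := rfl

-- the elif cascade when location[i+1] and location[i+2] both exist
theorem pvChain_ss (t u v C : String) :
    (pvArm t "NEW" (some u) "HAMPSHIRE" "NH" <|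
     pvArm t "NEW" (some u) "JERSEY" "NJ" <|
     pvArm t "NEW" (some u) "MEXICO" "NM" <|
     pvArm t "NORTH" (some u) "CAROLINA" "NC" <|
     pvArm t "NORTH" (some u) "DAKOTA" "ND" <|
     pvArm t "SOUTH" (some u) "CAROLINA" "SC" <|
     pvArm t "SOUTH" (some u) "DAKOTA" "SD" <|
     pvArmDC t (some u) (some v) <|
     pvArm t "NEW" (some u) "YORK" "NY" <|
     pvArm t "RHODE" (some u) "ISLAND" "RI" <|
     pvArm t "WEST" (some u) "VIRGINIA" "WV" C) =
    (match pvPhrase2.get? (t, u) with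
     | some r => r
     | none =>
       match pvPhrase3.get? (t, u, v) with
       | some r => r
       | none => C) := by
  simp only [pvArm, pvArmDC, pvPhrase2, pvPhrase3, PySem.Dict.get?_mk_cons, pvProdBeq2,
    pvProdBeq3, Bool.and_eq_true, beq_iff_eq]
  by_cases h1 : t = "NEW"
  · subst h1; simp [eq_comm, ite_and, pvGetNil] <;> (split_ifs <;> rfl)
  by_cases h2 : t = "NORTH"
  · subst h2; simp [eq_comm, ite_and, pvGetNil] <;> (split_ifs <;> rfl)
  by_cases h3 : t = "SOUTH"
  · subst h3; simp [eq_comm, ite_and, pvGetNil] <;> (split_ifs <;> rfl)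
  by_cases h4 : t = "DISTRICT"
  · subst h4; simp [eq_comm, ite_and, pvGetNil] <;> (split_ifs <;> rfl)
  by_cases h5 : t = "RHODE"
  · subst h5; simp [eq_comm, ite_and, pvGetNil] <;> (split_ifs <;> rfl)
  by_cases h6 : t = "WEST"
  · subst h6; simp [eq_comm, ite_and, pvGetNil] <;> (split_ifs <;> rfl)
  simp [h1, h2, h3, h4, h5, h6, eq_comm, pvGetNil]

-- the elif cascade when location[i+1] exists but location[i+2] does not
theorem pvChain_sn (t u C : String) :
    (pvArm t "NEW" (some u) "HAMPSHIRE" "NH" <|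
     pvArm t "NEW" (some u) "JERSEY" "NJ" <|
     pvArm t "NEW" (some u) "MEXICO" "NM" <|
     pvArm t "NORTH" (some u) "CAROLINA" "NC" <|
     pvArm t "NORTH" (some u) "DAKOTA" "ND" <|
     pvArm t "SOUTH" (some u) "CAROLINA" "SC" <|
     pvArm t "SOUTH" (some u) "DAKOTA" "SD" <|
     pvArmDC t (some u) none <|
     pvArm t "NEW" (some u) "YORK" "NY" <|
     pvArm t "RHODE" (some u) "ISLAND" "RI" <|
     pvArm t "WEST" (some u) "VIRGINIA" "WV" C) =
    (match pvPhrase2.get? (t, u) with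
     | some r => r
     | none => if t == "DISTRICT" && u == "OF" then "NULL" else C) := by
  simp only [pvArm, pvArmDC, pvPhrase2, PySem.Dict.get?_mk_cons, pvProdBeq2,
    pvProdBeq3, Bool.and_eq_true, beq_iff_eq]
  by_cases h1 : t = "NEW"
  · subst h1; simp [eq_comm, ite_and, pvGetNil] <;> (split_ifs <;> rfl)
  by_cases h2 : t = "NORTH"
  · subst h2; simp [eq_comm, ite_and, pvGetNil] <;> (split_ifs <;> rfl)
  by_cases h3 : t = "SOUTH"
  · subst h3; simp [eq_comm, ite_and, pvGetNil] <;> (split_ifs <;> rfl)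
  by_cases h4 : t = "DISTRICT"
  · subst h4; simp [eq_comm, ite_and, pvGetNil] <;> (split_ifs <;> rfl)
  by_cases h5 : t = "RHODE"
  · subst h5; simp [eq_comm, ite_and, pvGetNil] <;> (split_ifs <;> rfl)
  by_cases h6 : t = "WEST"
  · subst h6; simp [eq_comm, ite_and, pvGetNil] <;> (split_ifs <;> rfl)
  simp [h1, h2, h3, h4, h5, h6, eq_comm, pvGetNil]

-- the elif cascade when location[i+1] does not exist: every arm yields "NULL" or falls through
theorem pvChain_nn (t : String) :
    (pvArm t "NEW" none "HAMPSHIRE" "NH" <|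
     pvArm t "NEW" none "JERSEY" "NJ" <|
     pvArm t "NEW" none "MEXICO" "NM" <|
     pvArm t "NORTH" none "CAROLINA" "NC" <|
     pvArm t "NORTH" none "DAKOTA" "ND" <|
     pvArm t "SOUTH" none "CAROLINA" "SC" <|
     pvArm t "SOUTH" none "DAKOTA" "SD" <|
     pvArmDC t none none <|
     pvArm t "NEW" none "YORK" "NY" <|
     pvArm t "RHODE" none "ISLAND" "RI" <|
     pvArm t "WEST" none "VIRGINIA" "WV" "NULL") = "NULL" := by
  simp only [pvArm, pvArmDC]
  split_ifs <;> rfl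

-- pvScan unfolded to the nested table-match shape of the cascade
theorem pvScan_cons (t : String) (rest : List String) :
    pvScan (t :: rest) =
      (match pvSingle.get? t with
       | some r => r
       | none =>
         match rest with
         | [] => pvScan rest
         | u :: rest2 =>
           match pvPhrase2.get? (t, u) with
           | some r => r
           | none =>
             match rest2 with
             | [] => pvScan rest
             | v :: _ =>
               match pvPhrase3.get? (t, u, v) with
               | some r => r
               | none => pvScan rest) := by
  rw [pvScan]
  simp only [pvHit.eq_def]
  cases hS : pvSingle.get? t with
  | some r => simp
  | none =>
    cases rest with
    | nil => simp
    | cons u rest2 =>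
      cases h2 : pvPhrase2.get? (t, u) with
      | some r => simp [h2]
      | none =>
        cases rest2 with
        | nil => simp [h2]
        | cons v tl =>
          cases h3 : pvPhrase3.get? (t, u, v) <;> simp [h2, h3]

set_option maxRecDepth 2000000 in
set_option maxHeartbeats 1000000 in
theorem pvLoop_eq (n : Nat) (toks : List String) (i : Nat) (hn : toks.length - i ≤ n) :
    pvALoop toks i = pvScan (toks.drop i) := by
  induction n generalizing i with
  | zero =>
    have h : ¬ i < toks.length := by omega
    rw [pvALoop, dif_neg h, List.drop_eq_nil_of_le (by omega)]
    rfl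
  | succ n ih =>
    by_cases h : i < toks.length
    · rw [pvALoop, dif_pos h, List.drop_eq_getElem_cons h]
      have hIH : pvALoop toks (i+1) = pvScan (toks.drop (i+1)) := ih (i+1) (by omega)
      have h1 : PySem.List.pyGet? toks ((i+1 : Nat) : Int) = (toks.drop (i+1))[0]? := by
        rw [PySem.List.pyGet?_natCast, List.getElem?_drop]
      have h2 : PySem.List.pyGet? toks ((i+2 : Nat) : Int) = (toks.drop (i+1))[1]? := by
        rw [PySem.List.pyGet?_natCast, List.getElem?_drop]
      rw [pvSingleA_eq]
      cases hS : pvSingle.get? (toks[i]) with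
      | some r =>
        rw [pvScan_cons, hS]
      | none =>
        cases hts : toks.drop (i+1) with
        | nil =>
          rw [hts] at h1 h2 hIH
          simp only [List.getElem?_nil] at h1 h2
          rw [h1, h2, hIH]
          have hB0 : pvScan ([] : List String) = "NULL" := rfl
          have hB1 : pvScan [toks[i]] = "NULL" := by
            rw [pvScan_cons, hS]
            rfl
          rw [hB0, hB1]
          exact pvChain_nn _
        | cons u tl =>
          rw [hts] at h1 h2 hIH
          simp only [List.getElem?_cons_zero] at h1
          cases tl with
          | nil =>
            simp only [List.getElem?_cons_succ, List.getElem?_nil] at h2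
            rw [h1, h2, hIH, pvChain_sn]
            have hR : pvScan (toks[i] :: u :: []) =
                (match pvPhrase2.get? (toks[i], u) with
                 | some r => r
                 | none => pvScan [u]) := by
              rw [pvScan_cons, hS]
            rw [hR]
            cases hp : pvPhrase2.get? (toks[i], u) with
            | some r => rfl
            | none =>
              by_cases hd : (toks[i] == "DISTRICT" && u == "OF") = true
              · have hu : u = "OF" := by
                  simp only [Bool.and_eq_true, beq_iff_eq] at hd
                  exact hd.2
                rw [hd, if_pos rfl]
                subst hu
                decide
              · simp [hd]
          | cons v tl2 =>
            simp only [List.getElem?_cons_succ, List.getElem?_cons_zero] at h2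
            rw [h1, h2, hIH, pvChain_ss]
            conv_rhs => rw [pvScan_cons]
            rw [hS]
    · have h0 : ¬ i < toks.length := h
      rw [pvALoop, dif_neg h0, List.drop_eq_nil_of_le (by omega)]
      rfl

-- ---- decided facts about the concrete tables ----

-- every entry of the single-token table whose key is space-free is a 1-word pattern of B
set_option maxRecDepth 2000000 in
theorem pvFactSL : ∀ q ∈ pvSingleList, ' ' ∉ q.1.toList → ([q.1], q.2) ∈ pvPats := by decide

-- every 2-word phrase entry is a pattern of B
set_option maxRecDepth 2000000 in
theorem pvFactP2 : ∀ q ∈ pvPhrase2.items, ([q.1.1, q.1.2], q.2) ∈ pvPats := by decide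

-- the 3-word phrase entry is a pattern of B
set_option maxRecDepth 2000000 in
theorem pvFactP3 : ∀ q ∈ pvPhrase3.items, ([q.1.1, q.1.2.1, q.1.2.2], q.2) ∈ pvPats := by decide

-- B's patterns have 1, 2 or 3 words
set_option maxRecDepth 2000000 in
theorem pvFactLen : ∀ pa ∈ pvPats, pa.1.length = 1 ∨ pa.1.length = 2 ∨ pa.1.length = 3 := by decide

-- a 1-word pattern hits the single-token table with its own abbreviation
set_option maxRecDepth 2000000 in
theorem pvFact1 : ∀ pa ∈ pvPats, pa.1.length = 1 → pvSingle.get? pa.1.head! = some pa.2 := by decide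

-- a 2-word pattern misses the single-token table at its first word and hits the 2-word table
set_option maxRecDepth 2000000 in
theorem pvFact2 : ∀ pa ∈ pvPats, pa.1.length = 2 →
    pvSingle.get? pa.1.head! = none ∧ pvPhrase2.get? (pa.1.head!, pa.1.getLast!) = some pa.2 := by decide

-- the 3-word pattern misses both earlier tables and hits the 3-word table
set_option maxRecDepth 2000000 in
theorem pvFact3 : ∀ pa ∈ pvPats, pa.1.length = 3 →
    pvSingle.get? pa.1.head! = none ∧ pvPhrase2.get? (pa.1.head!, pa.1.tail.head!) = none ∧
    pvPhrase3.get? (pa.1.head!, pa.1.tail.head!, pa.1.tail.tail.head!) = some pa.2 := by decide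

-- the single-token table has distinct keys
set_option maxRecDepth 2000000 in
theorem pvFactNodup : (PySem.Dict.mk pvSingleList).keys.Nodup := by decide

set_option maxRecDepth 2000000 in
theorem pvFactNodup2 : pvPhrase2.keys.Nodup := by decide

set_option maxRecDepth 2000000 in
theorem pvFactNodup3 : pvPhrase3.keys.Nodup := by decide

-- ---- pvHit versus B's patterns ----

theorem pvHit_some (l : List String) (hl : ∀ w ∈ l, ' ' ∉ w.toList) (ab : String)
    (h : pvHit l = some ab) : ∃ p, (p, ab) ∈ pvPats ∧ p <+: l := by
  cases l with
  | nil => rw [show pvHit ([] : List String) = none from rfl] at h; exact absurd h (by simp)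
  | cons t rest =>
    simp only [pvHit.eq_def] at h
    cases hS : pvSingle.get? t with
    | some r =>
      rw [hS] at h
      simp only [Option.some.injEq] at h
      rw [h] at hS
      have hmem : (t, ab) ∈ pvSingleList :=
        (PySem.Dict.get?_eq_some_iff_mem_items _ _ _ pvFactNodup).mp (pvSingle_mk ▸ hS)
      exact ⟨[t], pvFactSL (t, ab) hmem (hl t (by simp)), ⟨rest, rfl⟩⟩
    | none =>
      rw [hS] at h
      cases rest with
      | nil => simp at h
      | cons u rest2 =>
        simp only at h
        cases h2 : pvPhrase2.get? (t, u) with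
        | some r =>
          rw [h2] at h
          simp only [Option.some.injEq] at h
          rw [h] at h2
          have hmem : ((t, u), ab) ∈ pvPhrase2.items :=
            (PySem.Dict.get?_eq_some_iff_mem_items _ _ _ pvFactNodup2).mp h2
          exact ⟨[t, u], pvFactP2 ((t, u), ab) hmem, ⟨rest2, rfl⟩⟩
        | none =>
          rw [h2] at h
          cases rest2 with
          | nil => simp at h
          | cons v tl =>
            simp only at h
            have hmem : ((t, u, v), ab) ∈ pvPhrase3.items :=
              (PySem.Dict.get?_eq_some_iff_mem_items _ _ _ pvFactNodup3).mp h
            exact ⟨[t, u, v], pvFactP3 ((t, u, v), ab) hmem, ⟨tl, rfl⟩⟩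

theorem pvHit_of_pat (l : List String) (p : List String) (ab : String)
    (hp : (p, ab) ∈ pvPats) (hpre : p <+: l) : pvHit l = some ab := by
  obtain ⟨s, rfl⟩ := hpre
  rcases pvFactLen (p, ab) hp with h1 | h2 | h3
  · obtain ⟨w, rfl⟩ := List.length_eq_one_iff.mp h1
    have hw : pvSingle.get? w = some ab := pvFact1 ([w], ab) hp rfl
    show pvHit (w :: s) = some ab
    simp [pvHit.eq_def, hw]
  · obtain ⟨a, b, rfl⟩ := List.length_eq_two.mp h2
    have hw : pvSingle.get? a = none ∧ pvPhrase2.get? (a, b) = some ab := pvFact2 ([a, b], ab) hp rfl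
    show pvHit (a :: b :: s) = some ab
    simp [pvHit.eq_def, hw.1, hw.2]
  · obtain ⟨a, b, c, rfl⟩ := List.length_eq_three.mp h3
    have hw : pvSingle.get? a = none ∧ pvPhrase2.get? (a, b) = none ∧
        pvPhrase3.get? (a, b, c) = some ab := pvFact3 ([a, b, c], ab) hp rfl
    show pvHit (a :: b :: c :: s) = some ab
    simp [pvHit.eq_def, hw.1, hw.2.1, hw.2.2]

-- ---- the find loop finds the first occurrence ----

theorem pvFind_none (ws pat : List String) (hne : pat ≠ []) :
    ∀ (n i : Nat), ws.length + 1 - i ≤ n → pvFindLoop ws pat i = none →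
      ∀ j, i ≤ j → ¬ pat <+: ws.drop j := by
  intro n
  induction n with
  | zero =>
    intro i hn _ j hij hpre
    have hj : ws.length ≤ j := by omega
    rw [List.drop_eq_nil_of_le hj] at hpre
    exact hne (List.prefix_nil.mp hpre)
  | succ n ih =>
    intro i hn h j hij hpre
    rw [pvFindLoop] at h
    by_cases hb : i + pat.length ≤ ws.length
    · rw [dif_pos hb] at h
      by_cases heq : (PySem.List.slice ws (some (i : Int)) (some ((i : Int) + (pat.length : Int))) == pat) = true
      · rw [if_pos heq] at h; simp at h
      · rw [if_neg heq] at h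
        rcases Nat.lt_or_ge i j with hij' | hij'
        · exact ih (i + 1) (by omega) h j (by omega) hpre
        · have hji : j = i := by omega
          subst hji
          apply heq
          rw [PySem.List.slice_natCast_add]
          exact beq_iff_eq.mpr (List.prefix_iff_eq_take.mp hpre).symm
    · rw [dif_neg hb] at h
      have hlen : pat.length ≤ (ws.drop j).length := hpre.length_le
      have hpos : 1 ≤ pat.length := List.length_pos_iff.mpr hne
      simp only [List.length_drop] at hlen
      omega

theorem pvFind_some (ws pat : List String) :
    ∀ (n i k : Nat), ws.length + 1 - i ≤ n → pvFindLoop ws pat i = some k →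
      i ≤ k ∧ pat <+: ws.drop k ∧ ∀ j, i ≤ j → j < k → ¬ pat <+: ws.drop j := by
  intro n
  induction n with
  | zero =>
    intro i k hn h
    rw [pvFindLoop, dif_neg (by omega)] at h
    simp at h
  | succ n ih =>
    intro i k hn h
    rw [pvFindLoop] at h
    by_cases hb : i + pat.length ≤ ws.length
    · rw [dif_pos hb] at h
      by_cases heq : (PySem.List.slice ws (some (i : Int)) (some ((i : Int) + (pat.length : Int))) == pat) = true
      · rw [if_pos heq] at h
        obtain rfl : i = k := by simpa using h
        refine ⟨le_refl _, ?_, fun j h1 h2 => absurd (Nat.lt_of_lt_of_le h2 h1) (Nat.lt_irrefl _)⟩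
        rw [PySem.List.slice_natCast_add] at heq
        have heq' : (ws.drop i).take pat.length = pat := by simpa using heq
        exact List.prefix_iff_eq_take.mpr heq'.symm
      · rw [if_neg heq] at h
        obtain ⟨hik, hp, hmin⟩ := ih (i + 1) k (by omega) h
        refine ⟨by omega, hp, fun j h1 h2 => ?_⟩
        rcases Nat.lt_or_ge i j with hij' | hij'
        · exact hmin j (by omega) h2
        · have hji : j = i := by omega
          subst hji
          intro hpre
          apply heq
          rw [PySem.List.slice_natCast_add]
          exact beq_iff_eq.mpr (List.prefix_iff_eq_take.mp hpre).symm
    · rw [dif_neg hb] at h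
      simp at h

-- ---- the (best_i, best_ab) fold computes the argmin ----

theorem pvFold_spec (ws : List String) :
    ∀ (L : List (List String × String)) (b : Nat × String),
      (L.foldl (pvBestStep ws) b).1 ≤ b.1 ∧
      (∀ pa ∈ L, ∀ i, pvFindLoop ws pa.1 0 = some i → (L.foldl (pvBestStep ws) b).1 ≤ i) ∧
      (L.foldl (pvBestStep ws) b = b ∨
        ∃ pa ∈ L, pvFindLoop ws pa.1 0 = some (L.foldl (pvBestStep ws) b).1 ∧
          (L.foldl (pvBestStep ws) b).2 = pa.2) := by
  intro L
  induction L with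
  | nil => exact fun b => ⟨le_refl _, by simp, Or.inl rfl⟩
  | cons pa L ih =>
    intro b
    obtain ⟨ih1, ih2, ih3⟩ := ih (pvBestStep ws b pa)
    have hstep1 : (pvBestStep ws b pa).1 ≤ b.1 := by
      unfold pvBestStep
      cases pvFindLoop ws pa.1 0 with
      | none => exact le_refl _
      | some i =>
        by_cases hi : i < b.1
        · simp [hi]; omega
        · simp [hi]
    refine ⟨by simpa using le_trans ih1 hstep1, ?_, ?_⟩
    · intro qa hqa i hfind
      rcases List.mem_cons.mp hqa with rfl | hqa'
      · have : (pvBestStep ws b qa).1 ≤ i := by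
          unfold pvBestStep
          rw [hfind]
          by_cases hi : i < b.1
          · simp [hi]
          · simp [hi]; omega
        simpa using le_trans ih1 this
      · simpa using ih2 qa hqa' i hfind
    · rcases ih3 with heq | ⟨qa, hqa, hf, hab⟩
      · simp only [List.foldl_cons] at *
        rw [heq]
        unfold pvBestStep
        cases hfind : pvFindLoop ws pa.1 0 with
        | none => exact Or.inl rfl
        | some i =>
          by_cases hi : i < b.1
          · exact Or.inr ⟨pa, by simp, by simp [hfind, hi]⟩
          · simp [hi]
      · exact Or.inr ⟨qa, by simp [hqa], by simpa using hf, by simpa using hab⟩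

-- ---- the scan returns the hit at the first hitting suffix ----

theorem pvScan_of_first (ws : List String) :
    ∀ i ab, pvHit (ws.drop i) = some ab → (∀ j, j < i → pvHit (ws.drop j) = none) →
      pvScan ws = ab := by
  induction ws with
  | nil => intro i ab h _; rw [List.drop_nil] at h; exact absurd h (by simp [pvHit.eq_def])
  | cons t rest ih =>
    intro i ab h hmin
    cases i with
    | zero =>
      simp only [List.drop_zero] at h
      rw [pvScan, h]
      rfl
    | succ k =>
      have h0 : pvHit (t :: rest) = none := by simpa using hmin 0 (Nat.succ_pos k)
      rw [pvScan, h0, Option.getD_none]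
      exact ih k ab (by simpa using h) (fun j hj => by simpa using hmin (j + 1) (by omega))

theorem pvScan_of_none (ws : List String) (h : ∀ i, pvHit (ws.drop i) = none) :
    pvScan ws = "NULL" := by
  induction ws with
  | nil => rfl
  | cons t rest ih =>
    rw [pvScan, show pvHit (t :: rest) = none from by simpa using h 0, Option.getD_none]
    exact ih (fun i => by simpa using h (i + 1))

-- ---- split() tokens contain no whitespace, uppercasing keeps it that way ----

theorem pvGo_nospace : ∀ (s cur : List Char) (acc : List (List Char)),
    (∀ c ∈ cur, PySem.Chars.isspace c = false) →
    (∀ w ∈ acc, ∀ c ∈ w, PySem.Chars.isspace c = false) →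
    ∀ w ∈ PySem.Chars.split₀.go s cur acc, ∀ c ∈ w, PySem.Chars.isspace c = false := by
  intro s
  induction s with
  | nil =>
    intro cur acc hcur hacc w hw
    rw [PySem.Chars.split₀.go] at hw
    by_cases hc : cur.isEmpty
    · rw [if_pos hc] at hw
      exact hacc w (List.mem_reverse.mp hw)
    · rw [if_neg hc] at hw
      rcases List.mem_cons.mp (List.mem_reverse.mp hw) with rfl | h
      · intro c hc'; exact hcur c (List.mem_reverse.mp hc')
      · exact hacc w h
  | cons c rest ih =>
    intro cur acc hcur hacc w hw
    rw [PySem.Chars.split₀.go] at hw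
    by_cases hsp : PySem.Chars.isspace c
    · rw [if_pos hsp] at hw
      by_cases hc : cur.isEmpty
      · rw [if_pos hc] at hw
        exact ih [] acc (fun c hc => absurd hc (List.not_mem_nil)) hacc w hw
      · rw [if_neg hc] at hw
        refine ih [] (cur.reverse :: acc) (fun c hc => absurd hc (List.not_mem_nil)) ?_ w hw
        intro w' hw'
        rcases List.mem_cons.mp hw' with rfl | h
        · intro c' hc'; exact hcur c' (List.mem_reverse.mp hc')
        · exact hacc w' h
    · rw [if_neg hsp] at hw
      refine ih (c :: cur) acc ?_ hacc w hw
      intro c' hc'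
      rcases List.mem_cons.mp hc' with rfl | h
      · simpa using hsp
      · exact hcur c' h

theorem pvUpperChar_ne_space (c : Char) (h : PySem.Chars.isspace c = false) :
    PySem.Chars.upperChar c ≠ ' ' := by
  unfold PySem.Chars.upperChar
  by_cases hl : PySem.Chars.islower c
  · rw [if_pos hl]
    unfold PySem.Chars.islower at hl
    simp only [Bool.and_eq_true, decide_eq_true_eq] at hl
    have h1 : 97 ≤ c.toNat := hl.1
    have h2 : c.toNat ≤ 122 := hl.2
    intro hcontra
    have hval : (Char.ofNat (c.toNat - 32)).toNat = c.toNat - 32 := by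
      unfold Char.ofNat
      split
      · rfl
      · next hbad => exact absurd (Or.inl (by omega)) hbad
    have : (' ' : Char).toNat = c.toNat - 32 := by rw [← hcontra, hval]
    simp only [show (' ' : Char).toNat = 32 from rfl] at this
    omega
  · rw [if_neg hl]
    intro hcontra
    subst hcontra
    simp [show PySem.Chars.isspace ' ' = true from rfl] at h

theorem pvTokens_nospace (s : String) :
    ∀ w ∈ (PySem.Str.split₀ s).map PySem.Str.upper, ' ' ∉ w.toList := by
  intro w hw
  obtain ⟨w0, hw0, rfl⟩ := List.mem_map.mp hw
  have hmem : w0.toList ∈ PySem.Chars.split₀ s.toList := by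
    have := PySem.Str.split₀_map_toList s
    exact this ▸ List.mem_map_of_mem hw0
  have hns : ∀ c ∈ w0.toList, PySem.Chars.isspace c = false :=
    pvGo_nospace s.toList [] [] (by simp) (by simp) w0.toList hmem
  intro hsp
  rw [show (PySem.Str.upper w0).toList = PySem.Chars.upper w0.toList from
    PySem.Str.toList_upper w0] at hsp
  obtain ⟨c, hc, hceq⟩ := List.mem_map.mp hsp
  exact pvUpperChar_ne_space c (hns c hc) hceq

-- ---- assembly ----

set_option maxRecDepth 2000000 in
theorem pvPats_ne : ∀ pa ∈ pvPats, pa.1 ≠ [] := by decide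

theorem pvCore_eq (ws : List String) (hns : ∀ w ∈ ws, ' ' ∉ w.toList) :
    pvScan ws = (pvPats.foldl (pvBestStep ws) (ws.length, "NULL")).2 := by
  obtain ⟨h1, h2, h3⟩ := pvFold_spec ws pvPats (ws.length, "NULL")
  set r := pvPats.foldl (pvBestStep ws) (ws.length, "NULL") with hr
  rcases h3 with heq | ⟨pa, hpa, hfind, hab⟩
  · -- no pattern improves on the init: nothing occurs anywhere, both sides are "NULL"
    rw [heq]
    apply pvScan_of_none
    intro j
    cases hhit : pvHit (ws.drop j) with
    | none => rfl
    | some ab =>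
      exfalso
      obtain ⟨p, hp, hpre⟩ := pvHit_some (ws.drop j) (fun w hw => hns w (List.mem_of_mem_drop hw)) ab hhit
      cases hfind : pvFindLoop ws p 0 with
      | none => exact pvFind_none ws p (pvPats_ne (p, ab) hp) (ws.length + 1) 0 (by omega) hfind j (Nat.zero_le j) hpre
      | some i =>
        have := h2 (p, ab) hp i hfind
        rw [heq] at this
        obtain ⟨-, hocc, -⟩ := pvFind_some ws p (ws.length + 1) 0 i (by omega) hfind
        have hlen : p.length ≤ ws.length - i := by
          have := hocc.length_le
          simpa using this
        have hpne : p ≠ [] := pvPats_ne (p, ab) hp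
        have : 1 ≤ p.length := List.length_pos_iff.mpr hpne
        simp only at this ⊢
        omega
  · -- r.1 is the minimal occurrence index, r.2 the corresponding abbreviation
    obtain ⟨-, hocc, -⟩ := pvFind_some ws pa.1 (ws.length + 1) 0 r.1 (by omega) hfind
    rw [hab]
    apply pvScan_of_first ws r.1
    · exact pvHit_of_pat (ws.drop r.1) pa.1 pa.2 (by rcases pa with ⟨p, ab⟩; exact hpa) hocc
    · intro j hj
      cases hhit : pvHit (ws.drop j) with
      | none => rfl
      | some ab =>
        exfalso
        obtain ⟨p, hp, hpre⟩ := pvHit_some (ws.drop j) (fun w hw => hns w (List.mem_of_mem_drop hw)) ab hhit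
        cases hfind' : pvFindLoop ws p 0 with
        | none => exact pvFind_none ws p (pvPats_ne (p, ab) hp) (ws.length + 1) 0 (by omega) hfind' j (Nat.zero_le j) hpre
        | some i =>
          obtain ⟨-, -, hmin⟩ := pvFind_some ws p (ws.length + 1) 0 i (by omega) hfind'
          have hle : i ≤ j := by
            by_contra hgt
            exact hmin j (Nat.zero_le j) (by omega) hpre
          have := h2 (p, ab) hp i hfind'
          omega

theorem pvAlt_eq (location : String) :
    get_state_name_alt location =
      (pvPats.foldl (pvBestStep ((PySem.Str.split₀ (PySem.Str.replace location "," " ")).map PySem.Str.upper))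
        (((PySem.Str.split₀ (PySem.Str.replace location "," " ")).map PySem.Str.upper).length, "NULL")).2 := by
  unfold get_state_name_alt pvPats
  rw [List.foldl_flatMap]
  rfl

-- ===== VERDICT (by name: the statement is the Claim_ definition above) =====
theorem get_state_name_spec : Claim_equal_get_state_name := by
  intro location _
  unfold Spec_get_state_name get_state_name
  rw [pvAlt_eq]
  rw [pvLoop_eq (((PySem.Str.split₀ (PySem.Str.replace location "," " "))).map PySem.Str.upper).length _ 0 (by omega)]
  simpa using pvCore_eq _ (pvTokens_nospace (PySem.Str.replace location "," " "))
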